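-- pv_equiv track=rewrite | github.com/jasonho2582001/comp0138-pytctracer | data/trace_parser_dynamic.py | naming_conventions
-- ===== SOURCE A (Python) =====
-- from collections import defaultdict
-- from typing import Optional, Set, List, Dict, Tuple
--
-- def naming_conventions(function_names_tuple: Set[Tuple[str, str]], test_names_tuple: Set[Tuple[str, str]], functions_called_by_each_test_dict: Dict[str, Set[str]]) -> Dict[str, Dict[str, float]]:
--     naming_conventions_dict = defaultdict(dict)
--
--     for test_fully_qualified_name, test_function_name in test_names_tuple:
--         functions_called_by_test = functions_called_by_each_test_dict[test_fully_qualified_name]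
--         for function_fully_qualified_name, function_name in function_names_tuple:
--             if test_function_name.startswith("test_"):
--                 stripped_test_function_name = test_function_name[5:]
--             else:
--                 # assumption that all test functions must begin with test
--                 stripped_test_function_name = test_function_name[4:]
--             naming_conventions_dict[test_fully_qualified_name][function_fully_qualified_name] = (1 if function_name == stripped_test_function_name else 0) if function_fully_qualified_name in functions_called_by_test else 0
--
--     return naming_conventions_dict
-- ===== SOURCE B (Python) =====
-- def naming_conventions(function_names_tuple, test_names_tuple, functions_called_by_each_test_dict):
--     # Staged inverted-index algorithm: (1) one pass collapsing the tuples to the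
--     # effective (last-written) name per fully qualified function name; (2) invert
--     # that into an index function_name -> [ffqns]; (3) per test, start from an
--     # all-zero row and sparsely flip to 1 only the ffqns the index says match the
--     # stripped test name and that the test actually calls.  No per-pair comparison.
--     last = {}
--     for ffqn, fname in function_names_tuple:
--         last[ffqn] = fname
--     index = {}
--     for ffqn, fname in last.items():
--         index.setdefault(fname, []).append(ffqn)
--     result = {}
--     for test_fqn, test_fn in test_names_tuple:
--         called = functions_called_by_each_test_dict[test_fqn]
--         stripped = test_fn[5:] if test_fn.startswith("test_") else test_fn[4:]
--         row = dict.fromkeys(last, 0)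
--         for ffqn in index.get(stripped, ()):
--             if ffqn in called:
--                 row[ffqn] = 1
--         result[test_fqn] = row
--     return result
-- ===== Notes on version B (the rewrite author's own statement) =====
-- stated objective: alternative
-- what changed: Replaces A's nested per-pair conditional writes with a staged inverted-index algorithm: collapse the tuples to a last-name dict, invert it into a function_name->ffqns index, then per test emit an all-zero row and sparsely set 1 only on the index hits that the test calls.
-- outside the precondition, e.g. on naming_conventions(set(), {('t.test_f', 'test_f')}, {'t.test_f': []}): A returns {}, B returns {'t.test_f': {}}
import Mathlib
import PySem

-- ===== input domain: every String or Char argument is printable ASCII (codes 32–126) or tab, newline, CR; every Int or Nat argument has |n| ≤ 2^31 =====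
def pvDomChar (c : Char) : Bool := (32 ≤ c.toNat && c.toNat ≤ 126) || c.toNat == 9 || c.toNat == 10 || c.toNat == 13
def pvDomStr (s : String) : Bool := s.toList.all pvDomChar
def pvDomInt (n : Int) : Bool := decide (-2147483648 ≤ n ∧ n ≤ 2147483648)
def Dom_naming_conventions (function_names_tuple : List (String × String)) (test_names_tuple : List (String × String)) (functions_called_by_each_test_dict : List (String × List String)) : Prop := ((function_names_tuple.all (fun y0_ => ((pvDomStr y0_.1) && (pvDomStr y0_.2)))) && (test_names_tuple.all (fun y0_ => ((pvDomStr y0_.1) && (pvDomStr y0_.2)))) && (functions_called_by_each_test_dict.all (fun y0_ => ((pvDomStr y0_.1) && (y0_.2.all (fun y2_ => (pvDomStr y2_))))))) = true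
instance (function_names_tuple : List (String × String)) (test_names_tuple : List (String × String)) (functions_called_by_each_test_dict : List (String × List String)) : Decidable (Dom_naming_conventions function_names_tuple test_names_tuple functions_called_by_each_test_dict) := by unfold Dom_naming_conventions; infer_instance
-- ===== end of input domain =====

-- B replaces A's nested per-pair conditional writes by a staged inverted-index algorithm
-- (last-name dict, then a function_name->ffqns index, then per test an all-zero row with
-- sparse 1-flips on index hits that the test calls): an alternative decomposition, proved
-- to return the same value on Pre_.


-- ===== PORT A =====
-- the value A stores into the matrix cell for function pair f, given the test's called set and stripped name
def pvCellA (called : List String) (stripped : String) (f : String × String) : Int :=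
  if called.contains f.1 then (if f.2 = stripped then 1 else 0) else 0

-- test_function_name[5:] / [4:] after the startswith check
def pvStripped (test_function_name : String) : String :=
  if PySem.Str.startswith test_function_name "test_" then PySem.Str.slice test_function_name (some 5) none
  else PySem.Str.slice test_function_name (some 4) none

def naming_conventions (function_names_tuple : List (String × String)) (test_names_tuple : List (String × String)) (functions_called_by_each_test_dict : List (String × List String)) : List (String × List (String × Int)) :=
  let res : PySem.Dict String (PySem.Dict String Int) :=
    test_names_tuple.foldl (fun acc t =>
      let called := ((PySem.Dict.mk functions_called_by_each_test_dict).get? t.1).getD []  -- Python raises KeyError when absent; Pre_ excludes that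
      function_names_tuple.foldl (fun acc f =>
        let stripped := pvStripped t.2
        -- naming_conventions_dict[test_fqn][function_fqn] = …  (defaultdict: missing outer key starts from {})
        acc.insert t.1 ((acc.getD t.1 PySem.Dict.empty).insert f.1 (pvCellA called stripped f))) acc)
      PySem.Dict.empty
  res.items.map (fun p => (p.1, p.2.items))

-- ===== PORT B =====
-- index.setdefault(fname, []).append(ffqn) over last.items(): fname -> list of ffqns
def pvIndex (last : PySem.Dict String String) : PySem.Dict String (List String) :=
  last.items.foldl (fun m q => m.modify q.2 [] (· ++ [q.1])) PySem.Dict.empty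

-- row = dict.fromkeys(last, 0); for ffqn in index.get(stripped, ()): if ffqn in called: row[ffqn] = 1
def pvRowB (last : PySem.Dict String String) (index : PySem.Dict String (List String)) (called : List String) (stripped : String) : List (String × Int) :=
  let row0 : PySem.Dict String Int := last.keys.foldl (fun r k => r.insert k 0) PySem.Dict.empty
  let hits := (index.get? stripped).getD []
  (hits.foldl (fun r f => if called.contains f then r.insert f 1 else r) row0).items

def naming_conventions_alt (function_names_tuple : List (String × String)) (test_names_tuple : List (String × String)) (functions_called_by_each_test_dict : List (String × List String)) : List (String × List (String × Int)) :=
  let last : PySem.Dict String String :=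
    function_names_tuple.foldl (fun m f => m.insert f.1 f.2) PySem.Dict.empty
  let index := pvIndex last
  let res : PySem.Dict String (List (String × Int)) :=
    test_names_tuple.foldl (fun acc t =>
      let called := ((PySem.Dict.mk functions_called_by_each_test_dict).get? t.1).getD []  -- Python raises KeyError when absent; Pre_ excludes that
      acc.insert t.1 (pvRowB last index called (pvStripped t.2)))
      PySem.Dict.empty
  res.items

-- ===== PRECONDITION & SPEC =====
-- Pre_ excludes (i) tests whose fully qualified name is missing from functions_called_by_each_test_dict,
-- where A (and B) raise KeyError, and (ii) the defensible corner of an empty function_names_tuple with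
-- tests present, where A's defaultdict never materialises a row ({}) while B returns an empty row per
-- test — both readings of an empty match matrix are defensible.
def Pre_naming_conventions (function_names_tuple : List (String × String)) (test_names_tuple : List (String × String)) (functions_called_by_each_test_dict : List (String × List String)) : Prop :=
  (test_names_tuple = [] ∨ function_names_tuple ≠ []) ∧
  ∀ t ∈ test_names_tuple, ((PySem.Dict.mk functions_called_by_each_test_dict).get? t.1).isSome
instance (function_names_tuple : List (String × String)) (test_names_tuple : List (String × String)) (functions_called_by_each_test_dict : List (String × List String)) : Decidable (Pre_naming_conventions function_names_tuple test_names_tuple functions_called_by_each_test_dict) := by unfold Pre_naming_conventions; infer_instance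

def pvWitness_naming_conventions : (List (String × String)) × (List (String × String)) × (List (String × List String)) :=
  ([("m.f", "f")], [("t.test_f", "test_f")], [("t.test_f", ["m.f"])])

def Spec_naming_conventions (function_names_tuple : List (String × String)) (test_names_tuple : List (String × String)) (functions_called_by_each_test_dict : List (String × List String)) (out : List (String × List (String × Int))) : Prop := out = naming_conventions_alt function_names_tuple test_names_tuple functions_called_by_each_test_dict
instance (function_names_tuple : List (String × String)) (test_names_tuple : List (String × String)) (functions_called_by_each_test_dict : List (String × List String)) (out : List (String × List (String × Int))) : Decidable (Spec_naming_conventions function_names_tuple test_names_tuple functions_called_by_each_test_dict out) := by unfold Spec_naming_conventions; infer_instance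

-- ===== CLAIM (what is proved, stated in full; the proofs are below) =====
def Claim_equal_naming_conventions : Prop := ∀ (function_names_tuple : List (String × String)) (test_names_tuple : List (String × String)) (functions_called_by_each_test_dict : List (String × List String)), Dom_naming_conventions function_names_tuple test_names_tuple functions_called_by_each_test_dict → Pre_naming_conventions function_names_tuple test_names_tuple functions_called_by_each_test_dict → Spec_naming_conventions function_names_tuple test_names_tuple functions_called_by_each_test_dict (naming_conventions function_names_tuple test_names_tuple functions_called_by_each_test_dict)

-- ===== LEMMAS AND PROOFS =====

-- the cell value B's sparse flip realises for index entry q = (ffqn, last fname)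
def pvCellB (called : List String) (stripped : String) (q : String × String) : Int :=
  if q.2 = stripped && called.contains q.1 then 1 else 0

theorem get?_foldl_insert (l : List (String × String)) (d : PySem.Dict String String) (k : String) :
    (l.foldl (fun s f => s.insert f.1 f.2) d).get? k =
      match l.reverse.find? (fun p => p.1 == k) with
      | some p => some p.2
      | none => d.get? k := by
  induction l generalizing d with
  | nil => simp
  | cons a l ih =>
    simp only [List.foldl_cons, List.reverse_cons, List.find?_append, ih]
    cases hf : l.reverse.find? (fun p => p.1 == k) with
    | some p => simp
    | none =>
      simp only [Option.none_or, List.find?_cons, List.find?_nil]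
      by_cases hk : a.1 = k
      · subst hk; simp [PySem.Dict.get?_insert_self]
      · rw [PySem.Dict.get?_insert_of_ne _ _ (Ne.symm hk)]
        have : (a.1 == k) = false := by simp [hk]
        simp [this]

theorem core (w : String → String → Int) (dflt : Int) :
    ∀ (fnt : List (String × String)) (dS : PySem.Dict String String) (dA : PySem.Dict String Int),
      dS.keys.Nodup → dA.keys = dS.keys →
      (fnt.foldl (fun a f => a.insert f.1 (w f.1 f.2)) dA).items =
        (fnt.foldl (fun s f => s.insert f.1 f.2) dS).items.map
          (fun q => (q.1, if q.1 ∈ fnt.map Prod.fst then w q.1 q.2 else dA.getD q.1 dflt)) := by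
  intro fnt
  induction fnt with
  | nil =>
    intro dS dA hS hk
    have hA : dA.keys.Nodup := hk ▸ hS
    simp only [List.foldl_nil, List.map_nil]
    rw [PySem.Dict.items_eq_map_keys dA hA dflt]
    have h2 : dS.items.map (fun q => ((q.1:String), dA.getD q.1 dflt))
        = (dS.items.map Prod.fst).map (fun k => (k, dA.getD k dflt)) := by
      simp [List.map_map]
    simp only [if_neg (List.not_mem_nil)]
    rw [h2, hk]
    simp only [PySem.Dict.keys]
  | cons a fnt ih =>
    intro dS dA hS hk
    have hcont : dA.contains a.1 = dS.contains a.1 := by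
      rw [PySem.Dict.contains_eq_decide_mem_keys, PySem.Dict.contains_eq_decide_mem_keys, hk]
    have hk' : (dA.insert a.1 (w a.1 a.2)).keys = (dS.insert a.1 a.2).keys := by
      by_cases h : dS.contains a.1 = true
      · rw [PySem.Dict.keys_insert_of_contains _ _ (hcont ▸ h), PySem.Dict.keys_insert_of_contains _ _ h, hk]
      · have h' : dS.contains a.1 = false := by cases hh : dS.contains a.1 <;> simp_all
        rw [PySem.Dict.keys_insert_of_not_contains _ _ (hcont ▸ h'), PySem.Dict.keys_insert_of_not_contains _ _ h', hk]
    have hS' : (dS.insert a.1 a.2).keys.Nodup := PySem.Dict.nodup_keys_insert _ _ _ hS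
    have hIH := ih (dS.insert a.1 a.2) (dA.insert a.1 (w a.1 a.2)) hS' hk'
    simp only [List.foldl_cons]
    rw [hIH]
    apply List.map_congr_left
    intro q hq
    by_cases hmem : q.1 ∈ fnt.map Prod.fst
    · simp [hmem]
    · by_cases heq : q.1 = a.1
      · have hnodup : (fnt.foldl (fun s f => s.insert f.1 f.2) (dS.insert a.1 a.2)).keys.Nodup :=
          PySem.Dict.nodup_keys_foldl_insert_key fnt Prod.fst (fun _ f => f.2) _ hS'
        have hq' : (q.1, q.2) ∈ (fnt.foldl (fun s f => s.insert f.1 f.2) (dS.insert a.1 a.2)).items := by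
          simpa using hq
        have hget := PySem.Dict.get?_of_mem_items _ hq' hnodup
        have hfind : fnt.reverse.find? (fun p => p.1 == q.1) = none := by
          rw [List.find?_eq_none]
          intro p hp
          simp only [beq_iff_eq]
          intro hpq
          exact hmem (hpq ▸ List.mem_map_of_mem (List.mem_reverse.mp hp))
        rw [get?_foldl_insert, hfind] at hget
        rw [heq, PySem.Dict.get?_insert_self] at hget
        have hq2 : q.2 = a.2 := by injection hget with h; exact h.symm
        have hmem2 : q.1 ∈ (a :: fnt).map Prod.fst := by simp [heq]
        rw [if_neg hmem, if_pos hmem2, heq, PySem.Dict.getD_insert_self, hq2]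
      · have hmem2 : q.1 ∉ (a :: fnt).map Prod.fst := by
          simp only [List.map_cons, List.mem_cons]
          tauto
        rw [if_neg hmem, if_neg hmem2, PySem.Dict.getD_insert_of_ne _ _ _ heq]

-- keys of the last-name dict built from empty are exactly the first occurrences of fnt's fsts
theorem keys_lastName (fnt : List (String × String)) :
    (fnt.foldl (fun s f => s.insert f.1 f.2) (PySem.Dict.empty : PySem.Dict String String)).keys
      = PySem.Set.ofList (fnt.map Prod.fst) := by
  rw [PySem.Dict.keys_foldl_insert_key fnt Prod.fst (fun _ f => f.2) PySem.Dict.empty]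
  simp [PySem.Set.update_nil_left, PySem.Dict.keys_empty]

theorem mem_keys_lastName {fnt : List (String × String)} {k : String}
    (h : k ∈ (fnt.foldl (fun s f => s.insert f.1 f.2) (PySem.Dict.empty : PySem.Dict String String)).keys) :
    k ∈ fnt.map Prod.fst := by
  rw [keys_lastName] at h
  exact (PySem.Set.mem_ofList _ _).mp h

theorem nodup_keys_lastName (fnt : List (String × String)) :
    (fnt.foldl (fun s f => s.insert f.1 f.2) (PySem.Dict.empty : PySem.Dict String String)).keys.Nodup :=
  PySem.Dict.nodup_keys_foldl_insert_key fnt Prod.fst (fun _ f => f.2) _ (by simp [PySem.Dict.keys_empty])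

-- the inverted index looked up at 'stripped' lists exactly the ffqns whose last name is 'stripped', in order
theorem index_getD (last : PySem.Dict String String) (stripped : String) :
    (pvIndex last).getD stripped [] =
      (last.items.filter (fun q => q.2 == stripped)).map Prod.fst := by
  unfold pvIndex
  have h : last.items.foldl (fun m q => m.modify q.2 [] (· ++ [q.1])) PySem.Dict.empty
      = (last.items.map (fun q => (q.2, q.1))).foldl (fun m p => m.modify p.1 [] (· ++ [p.2])) PySem.Dict.empty := by
    rw [List.foldl_map]
  rw [h, PySem.Dict.getD_foldl_modify_append, PySem.Dict.getD_empty, List.nil_append,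
    List.filter_map, List.map_map]
  rfl

-- the zero row has exactly last's items with every value 0
theorem row0_items (last : PySem.Dict String String) (h : last.keys.Nodup) :
    (last.keys.foldl (fun r k => r.insert k 0) (PySem.Dict.empty : PySem.Dict String Int)).items
      = last.items.map (fun q => (q.1, (0:Int))) := by
  have := PySem.Dict.items_foldl_insert_fresh (l := last.keys) (k := fun a => a)
    (v := fun _ => (0:Int)) (d := (PySem.Dict.empty : PySem.Dict String Int))
    (by intro a _; simp [PySem.Dict.contains_empty]) (by simpa using h)
  simp only [show (PySem.Dict.empty : PySem.Dict String Int).items = [] from rfl, List.nil_append] at this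
  rw [this]
  simp only [PySem.Dict.keys, List.map_map]
  rfl

-- sparse 1-flips over keys that are all present turn items into a pointwise map
theorem sparse_flip (c : String → Bool) :
    ∀ (us : List String) (r : PySem.Dict String Int), r.keys.Nodup →
      (∀ u ∈ us, r.contains u = true) →
      (us.foldl (fun r f => if c f then r.insert f 1 else r) r).items =
        r.items.map (fun p => if p.1 ∈ us ∧ c p.1 then (p.1, (1:Int)) else p) := by
  intro us
  induction us with
  | nil => intro r _ _; simp
  | cons u us ih =>
    intro r hnd hall
    simp only [List.foldl_cons]
    by_cases hc : c u
    · have hcont : r.contains u = true := hall u (List.mem_cons_self ..)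
      have hnd' : (r.insert u 1).keys.Nodup := PySem.Dict.nodup_keys_insert _ _ _ hnd
      have hall' : ∀ v ∈ us, (r.insert u 1).contains v = true := by
        intro v hv
        rw [PySem.Dict.contains_insert]
        simp [hall v (List.mem_cons_of_mem _ hv)]
      rw [if_pos hc, ih (r.insert u 1) hnd' hall',
        PySem.Dict.items_insert_of_contains _ _ hcont, List.map_map]
      apply List.map_congr_left
      intro p _
      by_cases hpu : p.1 = u
      · simp [Function.comp, hpu, hc]
      · have hb : (p.1 == u) = false := by simp [hpu]
        have h1 : (p.1 ∈ u :: us ∧ c p.1 = true) ↔ (p.1 ∈ us ∧ c p.1 = true) := by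
          simp [List.mem_cons, hpu]
        simp only [Function.comp, hb, Bool.false_eq_true, if_false, h1]
    · have hc' : c u = false := by cases h : c u <;> simp_all
      rw [if_neg (by simp [hc']), ih r hnd (fun v hv => hall v (List.mem_cons_of_mem _ hv))]
      apply List.map_congr_left
      intro p _
      by_cases hpu : p.1 = u
      · simp [hpu, hc']
      · have h1 : (p.1 ∈ u :: us ∧ c p.1) ↔ (p.1 ∈ us ∧ c p.1) := by
          simp [List.mem_cons, hpu]
        by_cases hm : p.1 ∈ us ∧ c p.1 = true
        · rw [if_pos hm, if_pos (h1.mpr hm)]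
        · rw [if_neg hm, if_neg (fun hx => hm (h1.mp hx))]

-- for an item of a nodup-keyed dict, membership of its key among the stripped-matching keys decides its name
theorem mem_matches_iff (last : PySem.Dict String String) (h : last.keys.Nodup)
    {q : String × String} (hq : q ∈ last.items) (stripped : String) :
    q.1 ∈ (last.items.filter (fun p => p.2 == stripped)).map Prod.fst ↔ q.2 = stripped := by
  constructor
  · intro hm
    obtain ⟨p, hp, hpe⟩ := List.mem_map.mp hm
    have hpf := List.mem_filter.mp hp
    have hg1 := PySem.Dict.get?_of_mem_items _ (show (q.1, q.2) ∈ last.items by simpa using hq) h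
    have hg2 := PySem.Dict.get?_of_mem_items _ (show (p.1, p.2) ∈ last.items by simpa using hpf.1) h
    rw [hpe] at hg2
    rw [hg1] at hg2
    injection hg2 with hv
    have : (p.2 == stripped) = true := hpf.2
    simp only [beq_iff_eq] at this
    rw [hv]; exact this
  · intro hs
    exact List.mem_map.mpr ⟨q, List.mem_filter.mpr ⟨hq, by simp [hs]⟩, rfl⟩

-- B's row computation equals the pointwise pvCellB map over last's items
theorem rowB_eq (last : PySem.Dict String String) (h : last.keys.Nodup)
    (called : List String) (stripped : String) :
    pvRowB last (pvIndex last) called stripped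
      = last.items.map (fun q => (q.1, pvCellB called stripped q)) := by
  unfold pvRowB
  have hr0 := row0_items last h
  have hr0keys : (last.keys.foldl (fun r k => r.insert k 0) (PySem.Dict.empty : PySem.Dict String Int)).keys = last.keys := by
    show (last.keys.foldl (fun r k => r.insert k 0) (PySem.Dict.empty : PySem.Dict String Int)).items.map (·.1) = last.keys
    rw [hr0, List.map_map]
    rfl
  have hmatches : ((pvIndex last).get? stripped).getD []
      = (last.items.filter (fun p => p.2 == stripped)).map Prod.fst := by
    rw [← PySem.Dict.getD_eq_get?_getD, index_getD]
  rw [hmatches]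
  rw [sparse_flip (fun f => called.contains f) _ _ (by rw [hr0keys]; exact h)
    (by
      intro u hu
      rw [PySem.Dict.contains_eq_decide_mem_keys, hr0keys]
      obtain ⟨p, hp, hpe⟩ := List.mem_map.mp hu
      have hpm := (List.mem_filter.mp hp).1
      exact decide_eq_true (hpe ▸ PySem.Dict.mem_keys_of_mem_items last hpm))]
  rw [hr0, List.map_map]
  apply List.map_congr_left
  intro q hq
  have hmem := mem_matches_iff last h hq stripped
  show (if (q.1 ∈ (last.items.filter (fun p => p.2 == stripped)).map Prod.fst ∧ called.contains q.1 = true)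
      then ((q.1 : String), (1 : Int)) else (q.1, 0)) = (q.1, pvCellB called stripped q)
  unfold pvCellB
  by_cases h1 : q.2 = stripped <;> by_cases h2 : called.contains q.1
  · rw [if_pos ⟨hmem.mpr h1, h2⟩]
    have hm2 : q.1 ∈ called := by simpa using h2
    simp [h1, hm2]
  · rw [if_neg (fun hx => h2 hx.2)]
    have hm2 : q.1 ∉ called := by simpa using h2
    simp [h1, hm2]
  · rw [if_neg (fun hx => h1 (hmem.mp hx.1))]
    simp [h1]
  · rw [if_neg (fun hx => h2 hx.2)]
    simp [h1]

-- re-folding the same pair list over its own last-name dict changes nothing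
theorem refold (fnt : List (String × String)) :
    fnt.foldl (fun s f => s.insert f.1 f.2)
        (fnt.foldl (fun s f => s.insert f.1 f.2) (PySem.Dict.empty : PySem.Dict String String))
      = fnt.foldl (fun s f => s.insert f.1 f.2) (PySem.Dict.empty : PySem.Dict String String) := by
  set L := fnt.foldl (fun s f => s.insert f.1 f.2) (PySem.Dict.empty : PySem.Dict String String) with hL
  have hkeys : (fnt.foldl (fun s f => s.insert f.1 f.2) L).keys = L.keys := by
    rw [PySem.Dict.keys_foldl_insert_key fnt Prod.fst (fun _ f => f.2) L]
    rw [PySem.Set.update_eq_append_filter]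
    have : (PySem.Set.ofList (fnt.map Prod.fst)).filter (fun y => !(PySem.Set.contains L.keys y)) = [] := by
      rw [List.filter_eq_nil_iff]
      intro x hx
      have : x ∈ L.keys := by rw [hL, keys_lastName]; exact hx
      simp [PySem.Set.contains_eq_listContains, this]
    rw [this, List.append_nil]
  have hnodup : (fnt.foldl (fun s f => s.insert f.1 f.2) L).keys.Nodup :=
    PySem.Dict.nodup_keys_foldl_insert_key fnt Prod.fst (fun _ f => f.2) _ (nodup_keys_lastName fnt)
  have hget : ∀ k, (fnt.foldl (fun s f => s.insert f.1 f.2) L).get? k = L.get? k := by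
    intro k
    rw [get?_foldl_insert, hL, get?_foldl_insert]
    cases hf : fnt.reverse.find? (fun p => p.1 == k) <;> simp
  apply PySem.Dict.ext
  rw [PySem.Dict.items_eq_map_keys _ hnodup "", PySem.Dict.items_eq_map_keys _ (nodup_keys_lastName fnt) ""]
  rw [hkeys]
  apply List.map_congr_left
  intro k _
  rw [PySem.Dict.getD_eq_get?_getD, PySem.Dict.getD_eq_get?_getD, hget]

-- A's per-cell writes for one test collapse to a single outer insert (nonempty fnt)
theorem inner_collapse (t1 : String) (v : (String × String) → Int) :
    ∀ (fnt : List (String × String)), fnt ≠ [] →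
      ∀ (acc : PySem.Dict String (PySem.Dict String Int)),
      fnt.foldl (fun acc f => acc.insert t1 ((acc.getD t1 PySem.Dict.empty).insert f.1 (v f))) acc
        = acc.insert t1 (fnt.foldl (fun inn f => inn.insert f.1 (v f)) (acc.getD t1 PySem.Dict.empty)) := by
  intro fnt
  induction fnt with
  | nil => intro h; exact absurd rfl h
  | cons a rest ih =>
    intro _ acc
    cases hr : rest with
    | nil => simp
    | cons b rest' =>
      rw [List.foldl_cons]
      rw [← hr]
      rw [ih (by simp [hr]) (acc.insert t1 ((acc.getD t1 PySem.Dict.empty).insert a.1 (v a)))]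
      rw [PySem.Dict.getD_insert_self, PySem.Dict.insert_insert_self, List.foldl_cons]

-- inserting the projected inner dict commutes with projecting the whole outer dict
theorem items_map_insert (d : PySem.Dict String (PySem.Dict String Int)) (k : String)
    (v : PySem.Dict String Int) :
    (PySem.Dict.mk (d.items.map (fun p => (p.1, p.2.items)))).insert k v.items
      = PySem.Dict.mk ((d.insert k v).items.map (fun p => (p.1, p.2.items))) := by
  have hcont : (PySem.Dict.mk (d.items.map (fun p => (p.1, p.2.items)))).contains k = d.contains k := by
    rw [PySem.Dict.contains_eq_decide_mem_keys, PySem.Dict.contains_eq_decide_mem_keys]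
    simp only [PySem.Dict.keys, List.map_map]
    rfl
  apply PySem.Dict.ext
  rw [PySem.Dict.items_insert, PySem.Dict.items_insert, hcont]
  by_cases h : d.contains k = true
  · simp only [h, if_true]
    simp only [List.map_map]
    apply List.map_congr_left
    intro p _
    by_cases hp : p.1 = k <;> simp [hp]
  · have h' : d.contains k = false := by cases hh : d.contains k <;> simp_all
    simp [h']

theorem cellA_eq_cellB (called : List String) (stripped : String) (q : String × String) :
    pvCellA called stripped q = pvCellB called stripped q := by
  unfold pvCellA pvCellB
  by_cases h1 : called.contains q.1 <;> by_cases h2 : q.2 = stripped <;> simp [*]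

-- one test's inner fold (A side) lands on the pvCellB row, from an empty start or any start with the last-name keys
theorem inner_row (called : List String) (stripped : String) (fnt : List (String × String))
    (inn0 : PySem.Dict String Int)
    (h : inn0 = PySem.Dict.empty ∨ inn0.keys =
      (fnt.foldl (fun s f => s.insert f.1 f.2) (PySem.Dict.empty : PySem.Dict String String)).keys) :
    (fnt.foldl (fun inn f => inn.insert f.1 (pvCellA called stripped f)) inn0).items =
      (fnt.foldl (fun s f => s.insert f.1 f.2) (PySem.Dict.empty : PySem.Dict String String)).items.map
        (fun q => (q.1, pvCellB called stripped q)) := by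
  set LN := fnt.foldl (fun s f => s.insert f.1 f.2) (PySem.Dict.empty : PySem.Dict String String) with hLN
  have hfun : (fun (inn : PySem.Dict String Int) (f : String × String) => inn.insert f.1 (pvCellA called stripped f))
      = fun a f => a.insert f.1 ((fun x y => pvCellA called stripped (x, y)) f.1 f.2) := rfl
  have congrmem : ∀ q ∈ LN.items, q.1 ∈ fnt.map Prod.fst := by
    intro q hq
    exact mem_keys_lastName (by simpa [PySem.Dict.keys, hLN] using List.mem_map_of_mem (f := Prod.fst) hq)
  cases h with
  | inl he =>
    rw [hfun, he, core (fun x y => pvCellA called stripped (x, y)) 0 fnt PySem.Dict.empty PySem.Dict.empty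
      (by simp [PySem.Dict.keys_empty]) rfl]
    apply List.map_congr_left
    intro q hq
    rw [if_pos (congrmem q hq)]
    rw [cellA_eq_cellB]
  | inr hk =>
    rw [hfun, core (fun x y => pvCellA called stripped (x, y)) 0 fnt LN inn0 (nodup_keys_lastName fnt) hk]
    rw [hLN, refold, ← hLN]
    apply List.map_congr_left
    intro q hq
    rw [if_pos (congrmem q hq)]
    rw [cellA_eq_cellB]

theorem outer (dct : List (String × List String)) (fnt : List (String × String)) (hf : fnt ≠ []) :
    ∀ (tnt : List (String × String)) (acc : PySem.Dict String (PySem.Dict String Int)),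
      (∀ k r, acc.get? k = some r → r.keys =
        (fnt.foldl (fun s f => s.insert f.1 f.2) (PySem.Dict.empty : PySem.Dict String String)).keys) →
      (tnt.foldl (fun acc t =>
          fnt.foldl (fun acc f =>
            acc.insert t.1 ((acc.getD t.1 PySem.Dict.empty).insert f.1
              (pvCellA (((PySem.Dict.mk dct).get? t.1).getD []) (pvStripped t.2) f))) acc) acc).items.map
        (fun p => (p.1, p.2.items))
      = (tnt.foldl (fun acc t =>
          acc.insert t.1
            (((fnt.foldl (fun s f => s.insert f.1 f.2) (PySem.Dict.empty : PySem.Dict String String)).items).map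
              (fun q => (q.1, pvCellB (((PySem.Dict.mk dct).get? t.1).getD []) (pvStripped t.2) q))))
          (PySem.Dict.mk (acc.items.map (fun p => (p.1, p.2.items))))).items := by
  intro tnt
  induction tnt with
  | nil => intro acc _; rfl
  | cons t rest ih =>
    intro acc hinv
    set LN := fnt.foldl (fun s f => s.insert f.1 f.2) (PySem.Dict.empty : PySem.Dict String String) with hLN
    set called := ((PySem.Dict.mk dct).get? t.1).getD [] with hcalled
    set stripped := pvStripped t.2 with hstripped
    set innerD := fnt.foldl (fun inn f => inn.insert f.1 (pvCellA called stripped f)) (acc.getD t.1 PySem.Dict.empty) with hinnerD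
    have hrow : innerD.items = LN.items.map (fun q => (q.1, pvCellB called stripped q)) := by
      apply inner_row
      cases hg : acc.get? t.1 with
      | none => left; rw [PySem.Dict.getD_eq_get?_getD, hg]; rfl
      | some r => right; rw [PySem.Dict.getD_eq_get?_getD, hg]; exact hinv t.1 r hg
    have hkeysInner : innerD.keys = LN.keys := by
      show innerD.items.map Prod.fst = LN.items.map Prod.fst
      rw [hrow, List.map_map]
      rfl
    simp only [List.foldl_cons]
    rw [inner_collapse t.1 (fun f => pvCellA called stripped f) fnt hf acc, ← hinnerD]
    rw [← hrow, items_map_insert]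
    apply ih
    intro k r hg
    rw [PySem.Dict.get?_insert] at hg
    by_cases hk : k = t.1
    · rw [if_pos hk] at hg
      injection hg with h
      rw [← h]
      exact hkeysInner
    · rw [if_neg hk] at hg
      exact hinv k r hg

-- ===== VERDICT (by name: the statement is the Claim_ definition above) =====
theorem naming_conventions_spec : Claim_equal_naming_conventions := by
  intro fnt tnt dct _ hPre
  unfold Spec_naming_conventions
  cases htnt : tnt with
  | nil => rfl
  | cons t rest =>
    have hf : fnt ≠ [] := by
      rcases hPre.1 with h | h
      · rw [htnt] at h; exact absurd h (by simp)
      · exact h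
    show (naming_conventions fnt (t :: rest) dct) = naming_conventions_alt fnt (t :: rest) dct
    unfold naming_conventions naming_conventions_alt
    have hrows : (fun (acc : PySem.Dict String (List (String × Int))) (t : String × String) =>
        acc.insert t.1 (pvRowB (fnt.foldl (fun m f => m.insert f.1 f.2) PySem.Dict.empty)
          (pvIndex (fnt.foldl (fun m f => m.insert f.1 f.2) PySem.Dict.empty))
          (((PySem.Dict.mk dct).get? t.1).getD []) (pvStripped t.2)))
        = (fun acc t => acc.insert t.1
            (((fnt.foldl (fun s f => s.insert f.1 f.2) (PySem.Dict.empty : PySem.Dict String String)).items).map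
              (fun q => (q.1, pvCellB (((PySem.Dict.mk dct).get? t.1).getD []) (pvStripped t.2) q)))) := by
      funext acc t
      rw [rowB_eq _ (nodup_keys_lastName fnt)]
    simp only [hrows]
    exact outer dct fnt hf (t :: rest) PySem.Dict.empty (fun k r h => by simp [PySem.Dict.get?_empty] at h)
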